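-- pv_equiv track=rewrite | github.com/charleshsc/CompoFormer | dt/approach/grow.py | merge_dictionaries
-- ===== SOURCE A (Python) =====
-- def merge_dictionaries(dicts):
--     # 初始化一个新的字典来存储结果
--     merged_dict = {}
--
--     # 获取所有字典的key
--     keys = set(key for d in dicts for key in d)
--
--     # 对每个key进行合并
--     for key in keys:
--         merged_value = 0
--         for d in dicts:
--             if key in d:
--                 merged_value |= d[key]
--         merged_dict[key] = merged_value
--
--     return merged_dict
-- ===== SOURCE B (Python) =====
-- def merge_dictionaries(dicts):
--     # Single pass over all entries, accumulating the bitwise OR per key.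
--     merged = {}
--     for d in dicts:
--         for key, value in d.items():
--             merged[key] = merged.get(key, 0) | value
--     return merged
-- ===== Notes on version B (the rewrite author's own statement) =====
-- stated objective: faster
-- what changed: Replaces the key-set pass with a nested scan over all dicts per key by a single pass over every (key, value) entry that accumulates the bitwise OR in one dict.
import Mathlib
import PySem

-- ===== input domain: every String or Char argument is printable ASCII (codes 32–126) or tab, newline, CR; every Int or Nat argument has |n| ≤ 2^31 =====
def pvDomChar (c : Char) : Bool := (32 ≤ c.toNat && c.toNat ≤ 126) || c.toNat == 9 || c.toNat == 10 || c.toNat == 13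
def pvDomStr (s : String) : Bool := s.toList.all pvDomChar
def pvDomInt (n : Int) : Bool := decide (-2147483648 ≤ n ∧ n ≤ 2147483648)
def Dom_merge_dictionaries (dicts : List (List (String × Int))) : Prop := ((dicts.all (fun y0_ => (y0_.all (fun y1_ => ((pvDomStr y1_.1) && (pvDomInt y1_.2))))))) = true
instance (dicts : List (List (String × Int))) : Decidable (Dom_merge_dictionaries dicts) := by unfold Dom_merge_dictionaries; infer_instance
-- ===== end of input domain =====

-- B replaces A's per-key rescan of every dict by one pass over all (key, value) entries accumulating bitwise OR (faster).


-- ===== PORT A =====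
-- keys = set(key for d in dicts for key in d); then for each key OR together d[key] over the dicts containing it.
-- (Python iterates the key set in hash order; the output dict is compared ignoring order, so first-occurrence order is used here.)
def merge_dictionaries (dicts : List (List (String × Int))) : List (String × Int) :=
  let keys : PySem.Set String := PySem.Set.ofList (dicts.flatMap (fun d => d.map Prod.fst))
  (keys.foldl (fun md key =>
      let mv : Int := dicts.foldl (fun acc d =>
        if (PySem.Dict.mk d).contains key then
          PySem.Int.bor acc (((PySem.Dict.mk d).get? key).getD 0)
        else acc) 0
      md.insert key mv) (PySem.Dict.empty : PySem.Dict String Int)).items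

-- ===== PORT B =====
-- merged = {}; for d in dicts: for key, value in d.items(): merged[key] = merged.get(key, 0) | value
def merge_dictionaries_alt (dicts : List (List (String × Int))) : List (String × Int) :=
  (dicts.foldl (fun m d =>
      d.foldl (fun m kv => m.insert kv.1 (PySem.Int.bor (m.getD kv.1 0) kv.2)) m)
    (PySem.Dict.empty : PySem.Dict String Int)).items

-- ===== PRECONDITION & SPEC =====
-- Pre_ excludes association lists that give one inner dict duplicate keys: such a list does not represent
-- any Python dict input (Python dict keys are unique), so neither program's behaviour is specified there.
def Pre_merge_dictionaries (dicts : List (List (String × Int))) : Prop :=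
  ∀ d ∈ dicts, (d.map Prod.fst).Nodup
instance (dicts : List (List (String × Int))) : Decidable (Pre_merge_dictionaries dicts) := by unfold Pre_merge_dictionaries; infer_instance

def pvWitness_merge_dictionaries : (List (List (String × Int))) :=
  [[("a", 5), ("b", 2)], [("a", 3)], []]

def Spec_merge_dictionaries (dicts : List (List (String × Int))) (out : List (String × Int)) : Prop := out = merge_dictionaries_alt dicts
instance (dicts : List (List (String × Int))) (out : List (String × Int)) : Decidable (Spec_merge_dictionaries dicts out) := by unfold Spec_merge_dictionaries; infer_instance

-- ===== CLAIM (what is proved, stated in full; the proofs are below) =====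
def Claim_equal_merge_dictionaries : Prop := ∀ (dicts : List (List (String × Int))), Dom_merge_dictionaries dicts → Pre_merge_dictionaries dicts → Spec_merge_dictionaries dicts (merge_dictionaries dicts)

-- ===== LEMMAS AND PROOFS =====

-- B's running dict, looked up at k, is the OR-fold over the entries with key k.
theorem altFold_getD (l : List (String × Int)) (m : PySem.Dict String Int) (k : String) :
    (l.foldl (fun m kv => m.insert kv.1 (PySem.Int.bor (m.getD kv.1 0) kv.2)) m).getD k 0
      = l.foldl (fun acc kv => if kv.1 = k then PySem.Int.bor acc kv.2 else acc) (m.getD k 0) := by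
  induction l generalizing m with
  | nil => rfl
  | cons p t ih =>
      simp only [List.foldl_cons, ih, PySem.Dict.getD_insert]
      by_cases h : p.1 = k
      · simp [h]
      · have h' : ¬ k = p.1 := fun hh => h hh.symm
        simp [h, h']

-- Entries with key k never touched: the OR-fold is the identity.
theorem orFold_not_mem (t : List (String × Int)) (k : String) :
    ∀ a : Int, (∀ kv ∈ t, kv.1 ≠ k) →
      t.foldl (fun acc kv => if kv.1 = k then PySem.Int.bor acc kv.2 else acc) a = a := by
  induction t with
  | nil => intro a _; rfl
  | cons p r ih =>
      intro a h
      rw [List.foldl_cons, if_neg (h p (by simp))]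
      exact ih a (fun kv hkv => h kv (by simp [hkv]))

-- On a dict with unique keys, the OR-fold over its entries is A's inner "if key in d: acc |= d[key]" step.
theorem orFold_eq_lookup (d : List (String × Int)) (k : String) (a : Int)
    (hnd : (d.map Prod.fst).Nodup) :
    d.foldl (fun acc kv => if kv.1 = k then PySem.Int.bor acc kv.2 else acc) a
      = if (PySem.Dict.mk d).contains k then
          PySem.Int.bor a (((PySem.Dict.mk d).get? k).getD 0)
        else a := by
  induction d generalizing a with
  | nil => simp [PySem.Dict.contains]
  | cons p t ih =>
      obtain ⟨pk, pv⟩ := p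
      simp only [List.map_cons, List.nodup_cons] at hnd
      by_cases h : pk = k
      · have hnot : ∀ kv ∈ t, kv.1 ≠ k := by
          intro kv hkv he
          exact hnd.1 (by rw [h, ← he]; exact List.mem_map_of_mem hkv)
        rw [List.foldl_cons, if_pos h, orFold_not_mem t k _ hnot]
        simp [PySem.Dict.contains, PySem.Dict.get?_mk_cons, h]
      · have hbeq : (pk == k) = false := by simp [h]
        rw [List.foldl_cons, if_neg h, ih a hnd.2]
        simp only [PySem.Dict.contains, PySem.Dict.get?_mk_cons, hbeq,
          Bool.false_or, Bool.false_eq_true, if_false, List.any_cons]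
        rfl

-- ===== VERDICT (by name: the statement is the Claim_ definition above) =====
theorem merge_dictionaries_spec : Claim_equal_merge_dictionaries := by
  intro dicts _hdom hpre
  unfold Spec_merge_dictionaries merge_dictionaries merge_dictionaries_alt
  simp only []
  -- name the two folds
  set bstep : PySem.Dict String Int → String × Int → PySem.Dict String Int :=
    fun m kv => m.insert kv.1 (PySem.Int.bor (m.getD kv.1 0) kv.2) with hbstep
  -- B's nested loop is one loop over all entries
  have hB : dicts.foldl (fun m d => d.foldl bstep m) PySem.Dict.empty
      = dicts.flatten.foldl bstep PySem.Dict.empty := List.foldl_flatten.symm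
  -- B's keys, in first-insertion order, are the key set in first-occurrence order
  have hkeysB : (dicts.flatten.foldl bstep PySem.Dict.empty).keys
      = PySem.Set.ofList (dicts.flatMap (fun d => d.map Prod.fst)) := by
    rw [hbstep]
    rw [PySem.Dict.keys_foldl_insert_key (key := Prod.fst)
      (f := fun m kv => PySem.Int.bor (m.getD kv.1 0) kv.2)]
    simp [PySem.Set.update_nil_left, List.map_flatten, List.flatMap_def]
  have hnodB : (dicts.flatten.foldl bstep PySem.Dict.empty).keys.Nodup := by
    rw [hbstep]
    exact PySem.Dict.nodup_keys_foldl_insert_key _ _ _ _ PySem.Dict.nodup_keys_empty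
  -- the per-key OR value A computes is B's lookup
  set G : String → Int := fun key => dicts.foldl (fun acc d =>
      if (PySem.Dict.mk d).contains key then
        PySem.Int.bor acc (((PySem.Dict.mk d).get? key).getD 0)
      else acc) 0 with hG
  set K : PySem.Set String := PySem.Set.ofList (dicts.flatMap (fun d => d.map Prod.fst)) with hK
  have hval : ∀ k ∈ K, G k = (dicts.flatten.foldl bstep PySem.Dict.empty).getD k 0 := by
    intro k _
    rw [hbstep, altFold_getD, PySem.Dict.getD_empty, List.foldl_flatten, hG]
    apply PySem.List.foldl_congr_mem
    intro acc d hd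
    exact (orFold_eq_lookup d k acc (hpre d hd)).symm
  -- both items lists enumerate K in order with those values
  show (K.foldl (fun md key => md.insert key (G key)) PySem.Dict.empty).items
      = (dicts.foldl (fun m d => d.foldl bstep m) PySem.Dict.empty).items
  rw [hB, PySem.Dict.items_eq_map_keys _ hnodB 0, hkeysB]
  have hAitems := PySem.Dict.items_foldl_insert_fresh (l := K) (d := PySem.Dict.empty)
    (k := fun key => key) (v := G)
    (fun a _ => PySem.Dict.contains_empty _)
    (by rw [List.map_id']; exact PySem.Set.nodup_ofList _)
  refine hAitems.trans ?_
  exact List.map_congr_left (fun k hk => by rw [hval k hk])
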